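-- pv_equiv track=rewrite | github.com/liupengsay/PyIsTheBestLang | src/search/dfs.py | gen_bfs_order_iteration
-- ===== SOURCE A (Python) =====
-- def gen_bfs_order_iteration(dct):
--     # 模板：生成深搜序即 dfs 序以及对应子树编号区间
--     n = len(dct)
--     for i in range(n):
--         dct[i].sort(reverse=True)  # 按照子节点编号从小到大进行遍历
--     order = 0
--     start = [-1] * n  # node_to_order
--     end = [-1]*n
--     parent = [-1]*n
--     stack = [[0, -1, 0]]
--     depth = [0]*n
--     order_to_node = [-1]*n
--     while stack:
--         i, fa, d = stack.pop()
--         if i >= 0: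
--             start[i] = order
--             order_to_node[order] = i
--             end[i] = order
--             depth[i] = d
--             order += 1
--             stack.append([~i, fa, d])
--             for j in dct[i]:
--                 if j != fa:  # 注意访问顺序可以进行调整
--                     parent[j] = i
--                     stack.append([j, i, d+1])
--         else:
--             i = ~i
--             if parent[i] != -1:
--                 end[parent[i]] = end[i]
--
--     return start, end
-- ===== SOURCE B (Python) =====
-- def gen_bfs_order_iteration(dct):
--     # Recursive DFS: start[i] is the preorder index of i, end[i] is the last
--     # preorder index inside i's subtree (order - 1 once the subtree is done).
--     # Rows are sorted descending in place, so iterating them reversed visits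
--     # children in ascending order.
--     n = len(dct)
--     for i in range(n):
--         dct[i].sort(reverse=True)
--     start = [-1] * n
--     end = [-1] * n
--     order = 0
--
--     def dfs(i, fa):
--         nonlocal order
--         start[i] = order
--         order += 1
--         for j in reversed(dct[i]):
--             if j != fa:
--                 dfs(j, i)
--         end[i] = order - 1
--
--     dfs(0, -1)
--     return start, end
-- ===== Notes on version B (the rewrite author's own statement) =====
-- stated objective: simpler
-- what changed: A's explicit stack with ~i close-sentinel frames and parent/depth/order_to_node bookkeeping arrays becomes a plain recursive dfs(i, fa) that sets start[i] on entry and end[i] = order - 1 on exit; …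
-- outside the precondition, e.g. on gen_bfs_order_iteration([[1], [-1]]): A returns ([0, 1], [0, 1]), B returns ([0, 3], [3, 3]); on gen_bfs_order_iteration([[1], [1], []]): A returns ([0, 2, -1], [0, 2, -1]), B returns ([0, 2, -1], [2, 2, -1]); on gen_bfs_order_iteration([[0], [3, 3, 3]]): A returns ([1, -1], [1, -1]), B returns ([1, -1], [1, -1])
import Mathlib
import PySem

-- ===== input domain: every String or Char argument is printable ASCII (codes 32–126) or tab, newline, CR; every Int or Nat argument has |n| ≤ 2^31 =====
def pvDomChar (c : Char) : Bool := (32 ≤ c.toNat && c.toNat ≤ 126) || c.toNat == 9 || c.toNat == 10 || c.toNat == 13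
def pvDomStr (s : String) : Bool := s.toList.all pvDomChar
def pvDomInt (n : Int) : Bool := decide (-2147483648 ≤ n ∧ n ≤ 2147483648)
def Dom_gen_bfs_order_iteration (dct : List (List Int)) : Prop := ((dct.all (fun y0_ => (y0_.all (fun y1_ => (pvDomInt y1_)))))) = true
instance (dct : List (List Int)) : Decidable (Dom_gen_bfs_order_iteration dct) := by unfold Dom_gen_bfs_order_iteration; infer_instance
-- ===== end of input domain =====

-- B replaces A's explicit stack (with ~i close sentinels and parent/depth/order_to_node
-- bookkeeping arrays) by a plain recursive DFS: start[i] on entry, end[i] = order - 1 on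
-- exit.  Equal return values on Pre_; both sort dct's rows in place (same mutation).

-- fuel bound shared by the ports: ≥ visits/pop events of any run Pre_ admits
def pvFuel (dct : List (List Int)) : Nat :=
  2 * (dct.length + 1) * ((dct.map List.length).sum + 1) + 1

-- ===== PORT A =====
-- the while-loop of A: stack of frames (i, fa, d); fuel is only a totality device
def loopA (g : List (List Int)) :
    Nat → List (Int × Int × Int) → Int → List Int → List Int → List Int → List Int → List Int →
    List Int × List Int
  | 0, _, _, start, end_, _, _, _ => (start, end_)
  | _ + 1, [], _, start, end_, _, _, _ => (start, end_)
  | f + 1, (i, fa, d) :: rest, order, start, end_, parent, depth, o2n =>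
    if 0 ≤ i then
      let start1 := PySem.List.pySetD start i order
      let o2n1 := PySem.List.pySetD o2n order i
      let end1 := PySem.List.pySetD end_ i order
      let depth1 := PySem.List.pySetD depth i d
      let ps := (PySem.List.pyGetD g i []).foldl
        (fun (ps : List Int × List (Int × Int × Int)) j =>
          if j ≠ fa then (PySem.List.pySetD ps.1 j i, (j, i, d + 1) :: ps.2) else ps)
        (parent, (-i - 1, fa, d) :: rest)
      loopA g f ps.2 (order + 1) start1 end1 ps.1 depth1 o2n1
    else
      -- popped a sentinel frame: i = ~t for the node t whose subtree just finished
      let t := -i - 1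
      if PySem.List.pyGetD parent t (-1) ≠ -1 then
        loopA g f rest order start
          (PySem.List.pySetD end_ (PySem.List.pyGetD parent t (-1)) (PySem.List.pyGetD end_ t 0))
          parent depth o2n
      else
        loopA g f rest order start end_ parent depth o2n

def gen_bfs_order_iteration (dct : List (List Int)) : List Int × List Int :=
  let n := dct.length
  let g := dct.map (fun l => PySem.List.sorted l (fun x => x) true)
  loopA g (pvFuel dct) [(0, -1, 0)] 0 (List.replicate n (-1)) (List.replicate n (-1))
    (List.replicate n (-1)) (List.replicate n (-1)) (List.replicate n (-1))

-- ===== PORT B =====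
-- Source B's loop 'for j in reversed(dct[i]): if j != fa: dfs(j, i)'; the recursive call
-- dfs(·, i) is the function argument f; none = fuel ran out (a totality device only)
def dfsNKids (f : Int → Int → List Int → List Int → Option (Int × List Int × List Int))
    (fa : Int) :
    List Int → Int → List Int → List Int → Option (Int × List Int × List Int)
  | [], order, s, e => some (order, s, e)
  | j :: L, order, s, e =>
    if j ≠ fa then
      match f j order s e with
      | none => none
      | some (o2, s2, e2) => dfsNKids f fa L o2 s2 e2
    else dfsNKids f fa L order s e

-- Source B's dfs(i, fa); the Nat is fuel (recursion depth), a totality device only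
def dfsN (g : List (List Int)) :
    Nat → Int → Int → Int → List Int → List Int → Option (Int × List Int × List Int)
  | 0, _, _, _, _, _ => none
  | sf + 1, i, fa, order, s, e =>
    let s1 := PySem.List.pySetD s i order
    match dfsNKids (fun j o ss ee => dfsN g sf j i o ss ee) fa
        (PySem.List.pyGetD g i []).reverse (order + 1) s1 e with
    | none => none
    | some (o2, s2, e2) => some (o2, s2, PySem.List.pySetD e2 i (o2 - 1))

def gen_bfs_order_iteration_alt (dct : List (List Int)) : List Int × List Int :=
  let n := dct.length
  let g := dct.map (fun l => PySem.List.sorted l (fun x => x) true)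
  match dfsN g (pvFuel dct) 0 (-1) 0 (List.replicate n (-1)) (List.replicate n (-1)) with
  | some (_, s, e) => (s, e)
  | none => (List.replicate n (-1), List.replicate n (-1))

-- ===== PRECONDITION & SPEC =====
def pvReachTreeKids (f : List Int → Int → Option (List Int)) :
    List Int → List Int → Option (List Int)
  | [], seen => some seen
  | j :: L, seen =>
    match f seen j with
    | none => none
    | some seen' => pvReachTreeKids f L seen'

-- a property of the input graph only: walk from node 0 along row entries (ascending,
-- skipping the immediate parent id) keeping a visited set; succeeds iff every reached id
-- is in [0, n) and none is reached twice — i.e. the reachable part of dct is a tree.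
-- It maintains nothing of the ports' state (no order counter, no start/end/parent arrays).
def pvReachTree (g : List (List Int)) : Nat → List Int → Int → Int → Option (List Int)
  | 0, _, _, _ => none
  | sf + 1, seen, i, fa =>
    if i < 0 ∨ (g.length : Int) ≤ i ∨ i ∈ seen then none
    else pvReachTreeKids (fun sn j => pvReachTree g sf sn j i)
      (((PySem.List.pyGetD g i []).filter (fun j => j ≠ fa)).reverse) (i :: seen)

-- Pre_: the DFS-reachable part of dct is a tree (no id visited twice, every visited id in
-- [0, n)).  Outside this A raises IndexError, except for two artefact corners A's
-- implementation happens to survive: negative in-range child ids, which A's ~i stack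
-- encoding misreads as close sentinels, and revisits whose total visit count still fits
-- in n, where A's overwritten parent array makes the result accidental (B recurses
-- normally there and may not return).
def Pre_gen_bfs_order_iteration (dct : List (List Int)) : Prop :=
  (pvReachTree (dct.map (fun l => PySem.List.sorted l (fun x => x) true))
    (pvFuel dct) [] 0 (-1)).isSome = true

instance (dct : List (List Int)) : Decidable (Pre_gen_bfs_order_iteration dct) := by
  unfold Pre_gen_bfs_order_iteration; infer_instance

def pvWitness_gen_bfs_order_iteration : List (List Int) := [[1], [0]]

def Spec_gen_bfs_order_iteration (dct : List (List Int)) (out : List Int × List Int) : Prop :=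
  out = gen_bfs_order_iteration_alt dct

instance (dct : List (List Int)) (out : List Int × List Int) :
    Decidable (Spec_gen_bfs_order_iteration dct out) := by
  unfold Spec_gen_bfs_order_iteration; infer_instance

-- ===== CLAIM (what is proved, stated in full; the proofs are below) =====
def Claim_equal_gen_bfs_order_iteration : Prop :=
  ∀ (dct : List (List Int)), Dom_gen_bfs_order_iteration dct →
    Pre_gen_bfs_order_iteration dct →
    Spec_gen_bfs_order_iteration dct (gen_bfs_order_iteration dct)

-- ===== LEMMAS AND PROOFS =====

-- ---------- small pyGetD/pySetD helpers ----------
theorem pvGetNN (l : List Int) (t : Int) (d : Int) (ht : 0 ≤ t) :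
    PySem.List.pyGetD l t d = l.getD t.toNat d := by
  have h := PySem.List.pyGetD_natCast l t.toNat d
  rwa [Int.toNat_of_nonneg ht] at h

theorem pvGetSetSelf (l : List Int) (i v d : Int) (h0 : 0 ≤ i) (h1 : i < (l.length : Int)) :
    PySem.List.pyGetD (PySem.List.pySetD l i v) i d = v := by
  have h2 : i.toNat < l.length := by omega
  rw [PySem.List.pySetD_of_nonneg _ _ h0, pvGetNN _ _ _ h0, List.getD_eq_getElem?_getD,
    List.getElem?_set]
  simp [h2]

theorem pvGetSetNe (l : List Int) (i t v d : Int) (h0 : 0 ≤ i) (ht : 0 ≤ t) (hne : t ≠ i) :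
    PySem.List.pyGetD (PySem.List.pySetD l i v) t d = PySem.List.pyGetD l t d := by
  have h2 : i.toNat ≠ t.toNat := by omega
  rw [PySem.List.pySetD_of_nonneg _ _ h0, pvGetNN _ _ _ ht, pvGetNN _ _ _ ht,
    List.getD_eq_getElem?_getD, List.getD_eq_getElem?_getD, List.getElem?_set]
  simp [h2]

theorem pvLenSet (l : List Int) (i v : Int) (h0 : 0 ≤ i) :
    (PySem.List.pySetD l i v).length = l.length := by
  exact PySem.List.length_pySetD l i v

theorem pvFoldSetLen (v : Int) : ∀ (ks : List Int) (p : List Int),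
    (∀ j ∈ ks, 0 ≤ j) →
    (ks.foldl (fun p j => PySem.List.pySetD p j v) p).length = p.length := by
  intro ks
  induction ks with
  | nil => intro p _; rfl
  | cons k ks ih =>
    intro p hall
    rw [List.foldl_cons, ih _ (fun j hj => hall j (List.mem_cons_of_mem _ hj)),
      pvLenSet _ _ _ (hall k (List.mem_cons_self))]

theorem pvFoldSetNe (v t : Int) (ht : 0 ≤ t) : ∀ (ks : List Int) (p : List Int),
    (∀ j ∈ ks, 0 ≤ j) → t ∉ ks →
    PySem.List.pyGetD (ks.foldl (fun p j => PySem.List.pySetD p j v) p) t (-1) =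
      PySem.List.pyGetD p t (-1) := by
  intro ks
  induction ks with
  | nil => intro p _ _; rfl
  | cons k ks ih =>
    intro p hall hmem
    rw [List.foldl_cons, ih _ (fun j hj => hall j (List.mem_cons_of_mem _ hj))
      (fun hh => hmem (List.mem_cons_of_mem _ hh)),
      pvGetSetNe _ _ _ _ _ (hall k (List.mem_cons_self)) ht
      (fun hh => hmem (hh ▸ List.mem_cons_self))]

theorem pvFoldSetMem (v t : Int) : ∀ (ks : List Int) (p : List Int),
    (∀ j ∈ ks, 0 ≤ j ∧ j < (p.length : Int)) → t ∈ ks →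
    PySem.List.pyGetD (ks.foldl (fun p j => PySem.List.pySetD p j v) p) t (-1) = v := by
  intro ks
  induction ks with
  | nil => intro p _ h; exact absurd h (List.not_mem_nil)
  | cons k ks ih =>
    intro p hall hmem
    rw [List.foldl_cons]
    have hk := hall k (List.mem_cons_self)
    have hlen : ((PySem.List.pySetD p k v).length : Int) = (p.length : Int) := by
      rw [pvLenSet _ _ _ hk.1]
    by_cases hx : t ∈ ks
    · exact ih _ (fun j hj => by
        have := hall j (List.mem_cons_of_mem _ hj); exact ⟨this.1, by rw [hlen]; exact this.2⟩) hx
    · have htk : t = k := by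
        rcases List.mem_cons.mp hmem with h | h
        · exact h
        · exact absurd h hx
      subst htk
      rw [pvFoldSetNe v t hk.1 ks _ (fun j hj => (hall j (List.mem_cons_of_mem _ hj)).1) hx,
        pvGetSetSelf _ _ _ _ hk.1 hk.2]

-- ---------- A-side: erase the write-only arrays, then defunctionalize ----------
-- Source B-independent close step of A: if parent[t] != -1: end[parent[t]] = end[t]
def pvClose (end_ par : List Int) (t : Int) : List Int :=
  if PySem.List.pyGetD par t (-1) ≠ -1 then
    PySem.List.pySetD end_ (PySem.List.pyGetD par t (-1)) (PySem.List.pyGetD end_ t 0)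
  else end_

-- loopA with the write-only depth and order_to_node arrays erased
def loopAred (g : List (List Int)) :
    Nat → List (Int × Int × Int) → Int → List Int → List Int → List Int →
    List Int × List Int
  | 0, _, _, start, end_, _ => (start, end_)
  | _ + 1, [], _, start, end_, _ => (start, end_)
  | f + 1, (i, fa, d) :: rest, order, start, end_, parent =>
    if 0 ≤ i then
      let start1 := PySem.List.pySetD start i order
      let end1 := PySem.List.pySetD end_ i order
      let ps := (PySem.List.pyGetD g i []).foldl
        (fun (ps : List Int × List (Int × Int × Int)) j =>
          if j ≠ fa then (PySem.List.pySetD ps.1 j i, (j, i, d + 1) :: ps.2) else ps)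
        (parent, (-i - 1, fa, d) :: rest)
      loopAred g f ps.2 (order + 1) start1 end1 ps.1
    else
      loopAred g f rest order start (pvClose end_ parent (-i - 1)) parent

-- recursive presentation of A's stack loop (proof layer only): a visit frame is a call,
-- a sentinel pop is the close step; gas counts pops, sf is a structural depth counter
def dfsMKids (f : Nat → Int → Int → List Int → List Int → List Int →
      Option Nat × Int × List Int × List Int × List Int) :
    List Int → Nat → Int → List Int → List Int → List Int →
    Option Nat × Int × List Int × List Int × List Int
  | [], gas, order, start, end_, par => (some gas, order, start, end_, par)
  | j :: L, gas, order, start, end_, par =>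
    if 0 ≤ j then
      match f gas j order start end_ par with
      | (none, o2, s2, e2, p2) => (none, o2, s2, e2, p2)
      | (some g2, o2, s2, e2, p2) => dfsMKids f L g2 o2 s2 e2 p2
    else
      match gas with
      | 0 => (none, order, start, end_, par)
      | gas + 1 => dfsMKids f L gas order start (pvClose end_ par (-j - 1)) par

def dfsM (g : List (List Int)) :
    Nat → Nat → Int → Int → Int → List Int → List Int → List Int →
    Option Nat × Int × List Int × List Int × List Int
  | 0, _, _, _, order, start, end_, par => (none, order, start, end_, par)
  | _ + 1, 0, _, _, order, start, end_, par => (none, order, start, end_, par)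
  | sf + 1, gas + 1, i, fa, order, start, end_, par =>
    let start1 := PySem.List.pySetD start i order
    let end1 := PySem.List.pySetD end_ i order
    let kids := (PySem.List.pyGetD g i []).filter (fun j => j ≠ fa)
    let par1 := kids.foldl (fun p j => PySem.List.pySetD p j i) par
    match dfsMKids (fun gas' j o s e p => dfsM g sf gas' j i o s e p) kids.reverse gas
        (order + 1) start1 end1 par1 with
    | (none, o2, s2, e2, p2) => (none, o2, s2, e2, p2)
    | (some 0, o2, s2, e2, p2) => (none, o2, s2, e2, p2)
    | (some (g2 + 1), o2, s2, e2, p2) => (some g2, o2, s2, pvClose e2 p2 i, p2)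

theorem loopA_eq_red (g : List (List Int)) :
    ∀ (f : Nat) (stack : List (Int × Int × Int)) (order : Int)
      (start end_ parent depth o2n : List Int),
      loopA g f stack order start end_ parent depth o2n =
        loopAred g f stack order start end_ parent := by
  intro f
  induction f with
  | zero => intro stack order start end_ parent depth o2n; rfl
  | succ f ih =>
    intro stack order start end_ parent depth o2n
    cases stack with
    | nil => rfl
    | cons fr rest =>
      obtain ⟨i, fa, d⟩ := fr
      by_cases hi : 0 ≤ i
      · simp only [loopA, loopAred, if_pos hi]
        exact ih _ _ _ _ _ _ _
      · simp only [loopA, loopAred, if_neg hi, pvClose]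
        by_cases hc : PySem.List.pyGetD parent (-i - 1) (-1) ≠ -1
        · simp only [if_pos hc]; exact ih _ _ _ _ _ _ _
        · simp only [if_neg hc]; exact ih _ _ _ _ _ _ _

theorem loopAred_nil (g : List (List Int)) (f : Nat) (order : Int) (start end_ parent : List Int) :
    loopAred g f [] order start end_ parent = (start, end_) := by
  cases f <;> rfl

-- A's push loop, split into its parent-array and stack components
theorem pair_fold (i fa d : Int) :
    ∀ (row : List Int) (par : List Int) (base : List (Int × Int × Int)),
      row.foldl
        (fun (ps : List Int × List (Int × Int × Int)) j =>
          if j ≠ fa then (PySem.List.pySetD ps.1 j i, (j, i, d + 1) :: ps.2) else ps)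
        (par, base) =
      ((row.filter (fun j => j ≠ fa)).foldl (fun p j => PySem.List.pySetD p j i) par,
        ((row.filter (fun j => j ≠ fa)).reverse.map (fun j => (j, i, d + 1))) ++ base) := by
  intro row
  induction row with
  | nil => intro par base; simp
  | cons j row ih =>
    intro par base
    rw [List.foldl_cons]
    by_cases hj : j ≠ fa
    · rw [if_pos hj, ih, List.filter_cons_of_pos (by simpa using hj)]
      simp
    · rw [if_neg hj, ih, List.filter_cons_of_neg (by simpa using hj)]

-- a normally returned gas is never larger than the gas supplied
theorem dfsMKids_gas_le
    (f : Nat → Int → Int → List Int → List Int → List Int →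
      Option Nat × Int × List Int × List Int × List Int)
    (hf : ∀ (gas : Nat) (j order : Int) (start end_ par : List Int)
      (g2 : Nat) (o2 : Int) (s2 e2 p2 : List Int),
      f gas j order start end_ par = (some g2, o2, s2, e2, p2) → g2 ≤ gas) :
    ∀ (L : List Int) (gas : Nat) (order : Int) (start end_ par : List Int)
      (g2 : Nat) (o2 : Int) (s2 e2 p2 : List Int),
      dfsMKids f L gas order start end_ par = (some g2, o2, s2, e2, p2) → g2 ≤ gas := by
  intro L
  induction L with
  | nil =>
    intro gas order start end_ par g2 o2 s2 e2 p2 h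
    simp only [dfsMKids, Prod.mk.injEq, Option.some.injEq] at h
    omega
  | cons j L ihL =>
    intro gas order start end_ par g2 o2 s2 e2 p2 h
    by_cases hj : 0 ≤ j
    · simp only [dfsMKids, if_pos hj] at h
      cases hB : f gas j order start end_ par with
      | mk og st =>
        obtain ⟨ob, sb, eb, pb⟩ := st
        rw [hB] at h
        cases og with
        | none => simp at h
        | some gB =>
          simp only at h
          exact le_trans (ihL _ _ _ _ _ _ _ _ _ _ h)
            (hf _ _ _ _ _ _ _ _ _ _ _ hB)
    · simp only [dfsMKids, if_neg hj] at h
      cases gas with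
      | zero => simp at h
      | succ gas => exact le_trans (ihL _ _ _ _ _ _ _ _ _ _ h) (Nat.le_succ _)

theorem dfsM_gas_le (g : List (List Int)) :
    ∀ (sf gas : Nat) (i fa order : Int) (start end_ par : List Int)
      (g2 : Nat) (o2 : Int) (s2 e2 p2 : List Int),
      dfsM g sf gas i fa order start end_ par = (some g2, o2, s2, e2, p2) → g2 ≤ gas := by
  intro sf
  induction sf with
  | zero =>
    intro gas i fa order start end_ par g2 o2 s2 e2 p2 h
    simp only [dfsM, Prod.mk.injEq, reduceCtorEq] at h
    exact h.1.elim
  | succ sf ih =>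
    intro gas i fa order start end_ par g2 o2 s2 e2 p2 h
    cases gas with
    | zero =>
      simp only [dfsM, Prod.mk.injEq, reduceCtorEq] at h
      exact h.1.elim
    | succ gas =>
      simp only [dfsM] at h
      cases hK : dfsMKids (fun gas' j o s e p => dfsM g sf gas' j i o s e p)
          ((PySem.List.pyGetD g i []).filter (fun j => j ≠ fa)).reverse gas
          (order + 1) (PySem.List.pySetD start i order) (PySem.List.pySetD end_ i order)
          (((PySem.List.pyGetD g i []).filter (fun j => j ≠ fa)).foldl
            (fun p j => PySem.List.pySetD p j i) par) with
      | mk og st =>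
        obtain ⟨ob, sb, eb, pb⟩ := st
        rw [hK] at h
        cases og with
        | none => simp at h
        | some gK =>
          cases gK with
          | zero => simp at h
          | succ gK =>
            simp only [Prod.mk.injEq, Option.some.injEq] at h
            have hle := dfsMKids_gas_le _
              (fun gas j o s e p g2 o2 s2 e2 p2 hh => ih gas j i o s e p g2 o2 s2 e2 p2 hh)
              _ _ _ _ _ _ _ _ _ _ _ hK
            omega

-- the kid loop of the defunctionalization
theorem simK (g : List (List Int)) (m : Nat)
    (ih : ∀ (gas : Nat) (i fa d : Int) (rest : List (Int × Int × Int)) (order : Int)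
      (start end_ par : List Int), gas ≤ m → 0 ≤ i →
      loopAred g gas ((i, fa, d) :: rest) order start end_ par =
        (match dfsM g m gas i fa order start end_ par with
         | (some g2, o2, s2, e2, p2) => loopAred g g2 rest o2 s2 e2 p2
         | (none, _, s2, e2, _) => (s2, e2))) :
    ∀ (L : List Int) (i fa d : Int) (rest : List (Int × Int × Int)) (gas : Nat)
      (order : Int) (start end_ par : List Int), gas ≤ m → 0 ≤ i →
      loopAred g gas ((L.map (fun j => (j, i, d + 1))) ++ (-i - 1, fa, d) :: rest)
          order start end_ par =
        (match dfsMKids (fun gas' j o s e p => dfsM g m gas' j i o s e p) L gas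
            order start end_ par with
         | (some g2, o2, s2, e2, p2) => loopAred g g2 ((-i - 1, fa, d) :: rest) o2 s2 e2 p2
         | (none, _, s2, e2, _) => (s2, e2)) := by
  intro L
  induction L with
  | nil =>
    intro i fa d rest gas order start end_ par hgas hi
    simp only [List.map_nil, List.nil_append, dfsMKids]
  | cons j L ihL =>
    intro i fa d rest gas order start end_ par hgas hi
    by_cases hj : 0 ≤ j
    · simp only [List.map_cons, List.cons_append]
      rw [ih gas j i (d + 1) _ order start end_ par hgas hj]
      cases hB : dfsM g m gas j i order start end_ par with
      | mk og st =>
        obtain ⟨o2, s2, e2, p2⟩ := st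
        cases og with
        | none => simp only [dfsMKids, if_pos hj, hB]
        | some gB =>
          simp only
          rw [ihL i fa d rest gB o2 s2 e2 p2
              (le_trans (dfsM_gas_le g m gas j i order start end_ par gB o2 s2 e2 p2 hB) hgas) hi]
          simp only [dfsMKids, if_pos hj, hB]
    · simp only [List.map_cons, List.cons_append]
      cases gas with
      | zero => simp only [loopAred, dfsMKids, if_neg hj]
      | succ gas =>
        simp only [loopAred, if_neg hj]
        rw [ihL i fa d rest gas order start (pvClose end_ par (-j - 1)) par (by omega) hi]
        simp only [dfsMKids, if_neg hj]

-- the defunctionalization bisimulation: popping a visit frame and then running the rest of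
-- the stack is running dfsM and then the rest of the stack, gas step for gas step
theorem sim (g : List (List Int)) :
    ∀ (sf gas : Nat) (i fa d : Int) (rest : List (Int × Int × Int)) (order : Int)
      (start end_ par : List Int), gas ≤ sf → 0 ≤ i →
      loopAred g gas ((i, fa, d) :: rest) order start end_ par =
        (match dfsM g sf gas i fa order start end_ par with
         | (some g2, o2, s2, e2, p2) => loopAred g g2 rest o2 s2 e2 p2
         | (none, _, s2, e2, _) => (s2, e2)) := by
  intro sf
  induction sf with
  | zero =>
    intro gas i fa d rest order start end_ par hgas hi
    have hg : gas = 0 := by omega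
    subst hg
    simp only [loopAred, dfsM]
  | succ m ih =>
    intro gas i fa d rest order start end_ par hgas hi
    cases gas with
    | zero => simp only [loopAred, dfsM]
    | succ gas =>
      simp only [loopAred, if_pos hi, dfsM]
      rw [pair_fold i fa d (PySem.List.pyGetD g i []) par ((-i - 1, fa, d) :: rest)]
      rw [simK g m ih ((PySem.List.pyGetD g i []).filter (fun j => j ≠ fa)).reverse i fa d rest
            gas (order + 1) (PySem.List.pySetD start i order) (PySem.List.pySetD end_ i order)
            (((PySem.List.pyGetD g i []).filter (fun j => j ≠ fa)).foldl
              (fun p j => PySem.List.pySetD p j i) par) (by omega) hi]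
      cases hK : dfsMKids (fun gas' j o s e p => dfsM g m gas' j i o s e p)
          ((PySem.List.pyGetD g i []).filter (fun j => j ≠ fa)).reverse gas
          (order + 1) (PySem.List.pySetD start i order) (PySem.List.pySetD end_ i order)
          (((PySem.List.pyGetD g i []).filter (fun j => j ≠ fa)).foldl
            (fun p j => PySem.List.pySetD p j i) par) with
      | mk og st =>
        obtain ⟨o2, s2, e2, p2⟩ := st
        cases og with
        | none => simp
        | some gK =>
          cases gK with
          | zero => simp only [loopAred]
          | succ gK =>
            have hneg : ¬ (0 ≤ -i - 1) := by omega
            have harg : -(-i - 1) - 1 = i := by ring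
            simp only [loopAred, if_neg hneg, harg]

-- ---------- scan structure lemmas ----------
theorem pvReachTreeKids_suffix (f : List Int → Int → Option (List Int))
    (hf : ∀ sn j sn', f sn j = some sn' → sn <:+ sn') :
    ∀ (L : List Int) (s0 s1 : List Int), pvReachTreeKids f L s0 = some s1 → s0 <:+ s1 := by
  intro L
  induction L with
  | nil =>
    intro s0 s1 h
    simp only [pvReachTreeKids, Option.some.injEq] at h
    exact h ▸ List.suffix_refl _
  | cons j L ih =>
    intro s0 s1 h
    simp only [pvReachTreeKids] at h
    cases hj : f s0 j with
    | none => rw [hj] at h; simp at h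
    | some sj =>
      rw [hj] at h
      exact (hf _ _ _ hj).trans (ih _ _ h)

theorem pvReachTree_suffix (g : List (List Int)) :
    ∀ (sf : Nat) (seen : List Int) (i fa : Int) (seen' : List Int),
      pvReachTree g sf seen i fa = some seen' → seen <:+ seen' ∧ i ∈ seen' := by
  intro sf
  induction sf with
  | zero => intro seen i fa seen' h; simp [pvReachTree] at h
  | succ sf ih =>
    intro seen i fa seen' h
    simp only [pvReachTree] at h
    by_cases hc : i < 0 ∨ (g.length : Int) ≤ i ∨ i ∈ seen
    · rw [if_pos hc] at h; simp at h
    · rw [if_neg hc] at h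
      have hs := pvReachTreeKids_suffix _ (fun sn j sn' hh => (ih sn j i sn' hh).1) _ _ _ h
      exact ⟨((List.suffix_cons i seen).trans hs), hs.subset (List.mem_cons_self)⟩

theorem pvReachTree_facts (g : List (List Int)) (sf : Nat) (seen : List Int) (i fa : Int)
    (seen' : List Int) (h : pvReachTree g sf seen i fa = some seen') :
    0 ≤ i ∧ i < (g.length : Int) ∧ i ∉ seen := by
  cases sf with
  | zero => simp [pvReachTree] at h
  | succ sf =>
    simp only [pvReachTree] at h
    by_cases hc : i < 0 ∨ (g.length : Int) ≤ i ∨ i ∈ seen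
    · rw [if_pos hc] at h; simp at h
    · push_neg at hc
      exact ⟨by omega, by omega, hc.2.2⟩

theorem pvReachTreeKids_all (g : List (List Int)) (sf : Nat) (v : Int) :
    ∀ (L : List Int) (s0 s1 : List Int),
      pvReachTreeKids (fun sn j => pvReachTree g sf sn j v) L s0 = some s1 →
      ∀ j ∈ L, 0 ≤ j ∧ j < (g.length : Int) ∧ j ∉ s0 ∧ j ∈ s1 := by
  intro L
  induction L with
  | nil => intro s0 s1 _ j hj; exact absurd hj (List.not_mem_nil)
  | cons k L ih =>
    intro s0 s1 h j hj
    simp only [pvReachTreeKids] at h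
    cases hk : pvReachTree g sf s0 k v with
    | none => rw [hk] at h; simp at h
    | some sk =>
      rw [hk] at h
      have hfacts := pvReachTree_facts g sf s0 k v sk hk
      have hsfx := pvReachTree_suffix g sf s0 k v sk hk
      have hrest : sk <:+ s1 :=
        pvReachTreeKids_suffix _ (fun sn j sn' hh => (pvReachTree_suffix g sf sn j v sn' hh).1) _ _ _ h
      rcases List.mem_cons.mp hj with rfl | hjL
      · exact ⟨hfacts.1, hfacts.2.1, hfacts.2.2, hrest.subset hsfx.2⟩
      · have := ih _ _ h j hjL
        exact ⟨this.1, this.2.1, fun hh => this.2.2.1 (hsfx.1.subset hh), this.2.2.2⟩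

theorem pvReachTreeKids_inv (f : List Int → Int → Option (List Int)) (P : Int → Prop)
    (hf : ∀ sn j sn', f sn j = some sn' → sn.Nodup →
      sn'.Nodup ∧ ∀ t ∈ sn', t ∈ sn ∨ P t) :
    ∀ (L : List Int) (s0 s1 : List Int), pvReachTreeKids f L s0 = some s1 → s0.Nodup →
      s1.Nodup ∧ ∀ t ∈ s1, t ∈ s0 ∨ P t := by
  intro L
  induction L with
  | nil =>
    intro s0 s1 h hnd
    simp only [pvReachTreeKids, Option.some.injEq] at h
    exact h ▸ ⟨hnd, fun t ht => Or.inl ht⟩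
  | cons k L ih =>
    intro s0 s1 h hnd
    simp only [pvReachTreeKids] at h
    cases hk : f s0 k with
    | none => rw [hk] at h; simp at h
    | some sk =>
      rw [hk] at h
      obtain ⟨hnd', hmem'⟩ := hf _ _ _ hk hnd
      obtain ⟨hnd'', hmem''⟩ := ih _ _ h hnd'
      refine ⟨hnd'', fun t ht => ?_⟩
      rcases hmem'' t ht with h1 | h1
      · exact hmem' t h1
      · exact Or.inr h1

theorem pvReachTree_inv (g : List (List Int)) :
    ∀ (sf : Nat) (seen : List Int) (i fa : Int) (seen' : List Int),
      pvReachTree g sf seen i fa = some seen' → seen.Nodup →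
      seen'.Nodup ∧ ∀ t ∈ seen', t ∈ seen ∨ (0 ≤ t ∧ t < (g.length : Int)) := by
  intro sf
  induction sf with
  | zero => intro seen i fa seen' h; simp [pvReachTree] at h
  | succ sf ih =>
    intro seen i fa seen' h hnd
    simp only [pvReachTree] at h
    by_cases hc : i < 0 ∨ (g.length : Int) ≤ i ∨ i ∈ seen
    · rw [if_pos hc] at h; simp at h
    · rw [if_neg hc] at h
      push_neg at hc
      have hnd1 : (i :: seen).Nodup := List.nodup_cons.mpr ⟨hc.2.2, hnd⟩
      obtain ⟨hnd', hmem'⟩ := pvReachTreeKids_inv _ (fun t => 0 ≤ t ∧ t < (g.length : Int))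
        (fun sn j sn' hh hn => ih sn j i sn' hh hn) _ _ _ h hnd1
      refine ⟨hnd', fun t ht => ?_⟩
      rcases hmem' t ht with h1 | h1
      · rcases List.mem_cons.mp h1 with rfl | h2
        · exact Or.inr ⟨by omega, by omega⟩
        · exact Or.inl h2
      · exact Or.inr h1

theorem pvLenBound (n : Nat) : ∀ (l : List Int), l.Nodup →
    (∀ t ∈ l, 0 ≤ t ∧ t < (n : Int)) → l.length ≤ n := by
  intro l hnd hall
  have hsub : l ⊆ List.map (fun k : Nat => (k : Int)) (List.range n) := by
    intro t ht
    have hta := hall t ht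
    have hmm : t.toNat ∈ List.range n := List.mem_range.mpr (by omega)
    have htt : t = ((t.toNat : Nat) : Int) := by omega
    rw [htt]
    exact List.mem_map.mpr ⟨t.toNat, hmm, rfl⟩
  calc l.length ≤ (List.map (fun k : Nat => (k : Int)) (List.range n)).length :=
        (List.subperm_of_subset hnd hsub).length_le
    _ = n := by simp

-- convert Source B's reversed-row loop with its inline j != fa test to the filtered form
def dfsNKidsF (f : Int → Int → List Int → List Int → Option (Int × List Int × List Int)) :
    List Int → Int → List Int → List Int → Option (Int × List Int × List Int)
  | [], order, s, e => some (order, s, e)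
  | j :: L, order, s, e =>
    match f j order s e with
    | none => none
    | some (o2, s2, e2) => dfsNKidsF f L o2 s2 e2

theorem dfsNKids_eq_filter (f : Int → Int → List Int → List Int →
      Option (Int × List Int × List Int)) (fa : Int) :
    ∀ (L : List Int) (order : Int) (s e : List Int),
      dfsNKids f fa L order s e = dfsNKidsF f (L.filter (fun j => j ≠ fa)) order s e := by
  intro L
  induction L with
  | nil => intro order s e; rfl
  | cons j L ih =>
    intro order s e
    by_cases hj : j ≠ fa
    · rw [List.filter_cons_of_pos (by simpa using hj)]
      simp only [dfsNKids, dfsNKidsF, if_pos hj]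
      cases hf : f j order s e with
      | none => rfl
      | some r => obtain ⟨o2, s2, e2⟩ := r; exact ih _ _ _
    · rw [List.filter_cons_of_neg (by simpa using hj)]
      simp only [dfsNKids, if_neg hj]
      exact ih _ _ _


-- ---------- the main bisimulation between dfsM (A) and dfsN (B) ----------
theorem pvFR (l : List Int) (p : Int → Bool) : l.reverse.filter p = (l.filter p).reverse := by
  simp [List.filter_reverse]

-- the kid loop of the main bisimulation, threading the scanner's visited set
theorem kidsSim (g : List (List Int)) (sf : Nat) (v : Int)
    (hv0 : 0 ≤ v) (hvn : v < (g.length : Int))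
    (ih : ∀ (gasM : Nat) (i fa order : Int) (s eM eN p seen seen' : List Int),
      pvReachTree g sf seen i fa = some seen' →
      2 * (seen'.length - seen.length) ≤ gasM →
      PySem.List.pyGetD p i (-1) = fa →
      (fa = -1 ∨ (0 ≤ fa ∧ fa < (g.length : Int) ∧ fa ∈ seen)) →
      (∀ t : Int, 0 ≤ t → t ∉ seen →
        PySem.List.pyGetD eM t 0 = PySem.List.pyGetD eN t 0) →
      s.length = g.length → eM.length = g.length → eN.length = g.length →
      p.length = g.length →
      ∃ (o2 : Int) (s2 e2M e2N p2 : List Int),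
        dfsM g sf gasM i fa order s eM p =
          (some (gasM - 2 * (seen'.length - seen.length)), o2, s2, e2M, p2) ∧
        dfsN g sf i fa order s eN = some (o2, s2, e2N) ∧
        o2 = order + ((seen'.length : Int) - (seen.length : Int)) ∧
        s2.length = g.length ∧ e2M.length = g.length ∧ e2N.length = g.length ∧
        p2.length = g.length ∧
        (∀ t : Int, 0 ≤ t → (t ∈ seen ∨ t ∉ seen') → t ≠ fa →
          PySem.List.pyGetD e2M t 0 = PySem.List.pyGetD eM t 0) ∧
        (∀ t : Int, 0 ≤ t → (t ∈ seen ∨ t ∉ seen') →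
          PySem.List.pyGetD e2N t 0 = PySem.List.pyGetD eN t 0) ∧
        (∀ t : Int, 0 ≤ t → t ∉ seen →
          PySem.List.pyGetD e2M t 0 = PySem.List.pyGetD e2N t 0) ∧
        (fa ≠ -1 → PySem.List.pyGetD e2M fa 0 = o2 - 1) ∧
        (∀ t : Int, 0 ≤ t → (t ∈ seen ∨ t ∉ seen') →
          PySem.List.pyGetD p2 t (-1) = PySem.List.pyGetD p t (-1))) :
    ∀ (L : List Int) (s0 s1 : List Int) (gasM : Nat) (order : Int) (s eM eN p : List Int),
      pvReachTreeKids (fun sn j => pvReachTree g sf sn j v) L s0 = some s1 →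
      2 * (s1.length - s0.length) ≤ gasM →
      v ∈ s0 →
      (∀ j ∈ L, PySem.List.pyGetD p j (-1) = v) →
      (∀ t : Int, 0 ≤ t → t ∉ s0 →
        PySem.List.pyGetD eM t 0 = PySem.List.pyGetD eN t 0) →
      PySem.List.pyGetD eM v 0 = order - 1 →
      s.length = g.length → eM.length = g.length → eN.length = g.length →
      p.length = g.length →
      ∃ (o2 : Int) (s2 e2M e2N p2 : List Int),
        dfsMKids (fun gas' j o ss ee pp => dfsM g sf gas' j v o ss ee pp) L gasM order s eM p
          = (some (gasM - 2 * (s1.length - s0.length)), o2, s2, e2M, p2) ∧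
        dfsNKidsF (fun j o ss ee => dfsN g sf j v o ss ee) L order s eN = some (o2, s2, e2N) ∧
        o2 = order + ((s1.length : Int) - (s0.length : Int)) ∧
        s2.length = g.length ∧ e2M.length = g.length ∧ e2N.length = g.length ∧
        p2.length = g.length ∧
        (∀ t : Int, 0 ≤ t → (t ∈ s0 ∨ t ∉ s1) → t ≠ v →
          PySem.List.pyGetD e2M t 0 = PySem.List.pyGetD eM t 0) ∧
        (∀ t : Int, 0 ≤ t → (t ∈ s0 ∨ t ∉ s1) →
          PySem.List.pyGetD e2N t 0 = PySem.List.pyGetD eN t 0) ∧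
        (∀ t : Int, 0 ≤ t → t ∉ s0 →
          PySem.List.pyGetD e2M t 0 = PySem.List.pyGetD e2N t 0) ∧
        PySem.List.pyGetD e2M v 0 = o2 - 1 ∧
        (∀ t : Int, 0 ≤ t → (t ∈ s0 ∨ t ∉ s1) →
          PySem.List.pyGetD p2 t (-1) = PySem.List.pyGetD p t (-1)) := by
  intro L
  induction L with
  | nil =>
    intro s0 s1 gasM order s eM eN p hscan hgas hv hP hE hb hls hlm hln hlp
    simp only [pvReachTreeKids, Option.some.injEq] at hscan
    subst hscan
    refine ⟨order, s, eM, eN, p, ?_, rfl, by push_cast; ring, hls, hlm, hln, hlp,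
      fun t _ _ _ => rfl, fun t _ _ => rfl, fun t ht h0 => hE t ht h0, hb,
      fun t _ _ => rfl⟩
    simp [dfsMKids]
  | cons j L ihL =>
    intro s0 s1 gasM order s eM eN p hscan hgas hv hP hE hb hls hlm hln hlp
    simp only [pvReachTreeKids] at hscan
    cases hj : pvReachTree g sf s0 j v with
    | none => rw [hj] at hscan; simp at hscan
    | some sj =>
      rw [hj] at hscan
      obtain ⟨hj0, _, _⟩ := pvReachTree_facts g sf s0 j v sj hj
      obtain ⟨hsfx, _⟩ := pvReachTree_suffix g sf s0 j v sj hj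
      have hrest : sj <:+ s1 :=
        pvReachTreeKids_suffix _ (fun sn j' sn' hh => (pvReachTree_suffix g sf sn j' v sn' hh).1) _ _ _ hscan
      have hl0 : s0.length ≤ sj.length := hsfx.length_le
      have hl1 : sj.length ≤ s1.length := hrest.length_le
      have hallL := pvReachTreeKids_all g sf v L sj s1 hscan
      obtain ⟨oj, s2j, e2Mj, e2Nj, p2j, hMj, hNj, hoj, hlsj, hlmj, hlnj, hlpj,
        E1j, E2j, E3j, E4j, P1j⟩ :=
        ih gasM j v order s eM eN p s0 sj hj (by omega)
          (hP j List.mem_cons_self)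
          (Or.inr ⟨hv0, hvn, hv⟩) hE hls hlm hln hlp
      obtain ⟨o2, s2, e2M, e2N, p2, hM2, hN2, ho2, hls2, hlm2, hln2, hlp2,
        E1r, E2r, E3r, hbr, P1r⟩ :=
        ihL sj s1 (gasM - 2 * (sj.length - s0.length)) oj s2j e2Mj e2Nj p2j hscan
          (by omega) (hsfx.subset hv)
          (fun j' hj' => by
            have hf := hallL j' hj'
            rw [P1j j' hf.1 (Or.inr hf.2.2.1)]
            exact hP j' (List.mem_cons_of_mem _ hj'))
          (fun t ht hts => E3j t ht (fun hh => hts (hsfx.subset hh)))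
          (E4j (by omega))
          hlsj hlmj hlnj hlpj
      have hgeq : gasM - 2 * (sj.length - s0.length) - 2 * (s1.length - sj.length)
          = gasM - 2 * (s1.length - s0.length) := by omega
      rw [hgeq] at hM2
      refine ⟨o2, s2, e2M, e2N, p2, ?_, ?_, ?_, hls2, hlm2, hln2, hlp2, ?_, ?_, ?_, hbr, ?_⟩
      · simp only [dfsMKids, if_pos hj0, hMj]
        exact hM2
      · simp only [dfsNKidsF, hNj]
        exact hN2
      · rw [ho2, hoj]; push_cast; ring
      · intro t ht hts htv
        have h1 : t ∈ sj ∨ t ∉ s1 := by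
          rcases hts with h | h
          · exact Or.inl (hsfx.subset h)
          · exact Or.inr h
        have h2 : t ∈ s0 ∨ t ∉ sj := by
          rcases hts with h | h
          · exact Or.inl h
          · exact Or.inr (fun hh => h (hrest.subset hh))
        rw [E1r t ht h1 htv, E1j t ht h2 htv]
      · intro t ht hts
        have h1 : t ∈ sj ∨ t ∉ s1 := by
          rcases hts with h | h
          · exact Or.inl (hsfx.subset h)
          · exact Or.inr h
        have h2 : t ∈ s0 ∨ t ∉ sj := by
          rcases hts with h | h
          · exact Or.inl h
          · exact Or.inr (fun hh => h (hrest.subset hh))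
        rw [E2r t ht h1, E2j t ht h2]
      · intro t ht hts
        by_cases hmem : t ∈ sj
        · have htv : t ≠ v := fun hh => hts (hh ▸ hv)
          rw [E1r t ht (Or.inl hmem) htv, E2r t ht (Or.inl hmem)]
          exact E3j t ht hts
        · rw [E3r t ht hmem]
      · intro t ht hts
        have h1 : t ∈ sj ∨ t ∉ s1 := by
          rcases hts with h | h
          · exact Or.inl (hsfx.subset h)
          · exact Or.inr h
        have h2 : t ∈ s0 ∨ t ∉ sj := by
          rcases hts with h | h
          · exact Or.inl h
          · exact Or.inr (fun hh => h (hrest.subset hh))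
        rw [P1r t ht h1, P1j t ht h2]

theorem mainSim (g : List (List Int)) :
    ∀ (sf : Nat) (gasM : Nat) (i fa order : Int) (s eM eN p seen seen' : List Int),
      pvReachTree g sf seen i fa = some seen' →
      2 * (seen'.length - seen.length) ≤ gasM →
      PySem.List.pyGetD p i (-1) = fa →
      (fa = -1 ∨ (0 ≤ fa ∧ fa < (g.length : Int) ∧ fa ∈ seen)) →
      (∀ t : Int, 0 ≤ t → t ∉ seen →
        PySem.List.pyGetD eM t 0 = PySem.List.pyGetD eN t 0) →
      s.length = g.length → eM.length = g.length → eN.length = g.length →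
      p.length = g.length →
      ∃ (o2 : Int) (s2 e2M e2N p2 : List Int),
        dfsM g sf gasM i fa order s eM p =
          (some (gasM - 2 * (seen'.length - seen.length)), o2, s2, e2M, p2) ∧
        dfsN g sf i fa order s eN = some (o2, s2, e2N) ∧
        o2 = order + ((seen'.length : Int) - (seen.length : Int)) ∧
        s2.length = g.length ∧ e2M.length = g.length ∧ e2N.length = g.length ∧
        p2.length = g.length ∧
        (∀ t : Int, 0 ≤ t → (t ∈ seen ∨ t ∉ seen') → t ≠ fa →
          PySem.List.pyGetD e2M t 0 = PySem.List.pyGetD eM t 0) ∧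
        (∀ t : Int, 0 ≤ t → (t ∈ seen ∨ t ∉ seen') →
          PySem.List.pyGetD e2N t 0 = PySem.List.pyGetD eN t 0) ∧
        (∀ t : Int, 0 ≤ t → t ∉ seen →
          PySem.List.pyGetD e2M t 0 = PySem.List.pyGetD e2N t 0) ∧
        (fa ≠ -1 → PySem.List.pyGetD e2M fa 0 = o2 - 1) ∧
        (∀ t : Int, 0 ≤ t → (t ∈ seen ∨ t ∉ seen') →
          PySem.List.pyGetD p2 t (-1) = PySem.List.pyGetD p t (-1)) := by
  intro sf
  induction sf with
  | zero =>
    intro gasM i fa order s eM eN p seen seen' hscan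
    simp [pvReachTree] at hscan
  | succ sf ih =>
    intro gasM i fa order s eM eN p seen seen' hscan hgas hp hfa hE hls hlm hln hlp
    simp only [pvReachTree] at hscan
    by_cases hc : i < 0 ∨ (g.length : Int) ≤ i ∨ i ∈ seen
    · rw [if_pos hc] at hscan; simp at hscan
    · rw [if_neg hc] at hscan
      push_neg at hc
      have hi0 : (0 : Int) ≤ i := by omega
      have hin : i < (g.length : Int) := by omega
      have hiseen : i ∉ seen := hc.2.2
      have hsfx2 : (i :: seen) <:+ seen' :=
        pvReachTreeKids_suffix _ (fun sn j sn' hh => (pvReachTree_suffix g sf sn j i sn' hh).1) _ _ _ hscan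
      have hΔ : seen.length + 1 ≤ seen'.length := by
        have := hsfx2.length_le; simpa using this
      obtain ⟨gas', rfl⟩ : ∃ k, gasM = k + 1 := ⟨gasM - 1, by omega⟩
      have hallK := pvReachTreeKids_all g sf i _ _ _ hscan
      have hkids' : ∀ j ∈ (PySem.List.pyGetD g i []).filter (fun j => j ≠ fa),
          0 ≤ j ∧ j < (g.length : Int) ∧ j ∉ (i :: seen) ∧ j ∈ seen' := by
        intro j hj; exact hallK j (List.mem_reverse.mpr hj)
      have hlp1 : ((((PySem.List.pyGetD g i []).filter (fun j => j ≠ fa)).foldl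
          (fun p j => PySem.List.pySetD p j i) p)).length = g.length := by
        rw [pvFoldSetLen i _ p (fun j hj => (hkids' j hj).1), hlp]
      obtain ⟨o2, s2, e2M, e2N, p2, hMk, hNk, ho2, hls2, hlm2, hln2, hlp2,
        E1k, E2k, E3k, hbk, P1k⟩ :=
        kidsSim g sf i hi0 hin ih
          ((PySem.List.pyGetD g i []).filter (fun j => j ≠ fa)).reverse (i :: seen) seen'
          gas' (order + 1) (PySem.List.pySetD s i order) (PySem.List.pySetD eM i order) eN
          (((PySem.List.pyGetD g i []).filter (fun j => j ≠ fa)).foldl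
            (fun p j => PySem.List.pySetD p j i) p)
          hscan (by simp only [List.length_cons]; omega)
          List.mem_cons_self
          (fun j hj => by
            exact pvFoldSetMem i j _ p
              (fun j' hj' => ⟨(hkids' j' hj').1, by rw [hlp]; exact (hkids' j' hj').2.1⟩)
              (List.mem_reverse.mp hj))
          (fun t ht hts => by
            have htne : t ≠ i := fun hh => hts (hh ▸ List.mem_cons_self)
            rw [pvGetSetNe eM i t order 0 hi0 ht htne]
            exact hE t ht (fun hh => hts (List.mem_cons_of_mem _ hh)))
          (by rw [pvGetSetSelf eM i order 0 hi0 (by rw [hlm]; exact hin)]; ring)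
          (by rw [pvLenSet s i order hi0, hls])
          (by rw [pvLenSet eM i order hi0, hlm])
          hln hlp1
      have hgk : gas' - 2 * (seen'.length - (i :: seen).length)
          = (gas' + 1 - 2 * (seen'.length - seen.length)) + 1 := by
        simp only [List.length_cons]; omega
      rw [hgk] at hMk
      have hiknot : i ∉ (PySem.List.pyGetD g i []).filter (fun j => j ≠ fa) :=
        fun hh => (hkids' i hh).2.2.1 List.mem_cons_self
      have hp2i : PySem.List.pyGetD p2 i (-1) = fa := by
        rw [P1k i hi0 (Or.inl List.mem_cons_self),
          pvFoldSetNe i i hi0 _ p (fun j hj => (hkids' j hj).1) hiknot, hp]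
      have hML : dfsM g (sf + 1) (gas' + 1) i fa order s eM p
          = (some (gas' + 1 - 2 * (seen'.length - seen.length)), o2, s2,
              pvClose e2M p2 i, p2) := by
        simp only [dfsM]
        rw [hMk]
      have hNL : dfsN g (sf + 1) i fa order s eN
          = some (o2, s2, PySem.List.pySetD e2N i (o2 - 1)) := by
        simp only [dfsN]
        rw [dfsNKids_eq_filter, pvFR, hNk]
      have hto2 : o2 = order + ((seen'.length : Int) - (seen.length : Int)) := by
        rw [ho2]; simp only [List.length_cons]; push_cast; ring
      have htne_of : ∀ t : Int, (t ∈ seen ∨ t ∉ seen') → t ≠ i := by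
        intro t hts hh
        rcases hts with h | h
        · exact hiseen (hh ▸ h)
        · exact h (hh ▸ hsfx2.subset List.mem_cons_self)
      have hcons_of : ∀ t : Int, (t ∈ seen ∨ t ∉ seen') → (t ∈ (i :: seen) ∨ t ∉ seen') := by
        intro t hts
        rcases hts with h | h
        · exact Or.inl (List.mem_cons_of_mem _ h)
        · exact Or.inr h
      have hP1 : ∀ t : Int, 0 ≤ t → (t ∈ seen ∨ t ∉ seen') →
          PySem.List.pyGetD p2 t (-1) = PySem.List.pyGetD p t (-1) := by
        intro t ht hts
        have htk : t ∉ (PySem.List.pyGetD g i []).filter (fun j => j ≠ fa) := by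
          intro hh
          have hf := hkids' t hh
          rcases hts with h | h
          · exact hf.2.2.1 (List.mem_cons_of_mem _ h)
          · exact h hf.2.2.2
        rw [P1k t ht (hcons_of t hts),
          pvFoldSetNe i t ht _ p (fun j hj => (hkids' j hj).1) htk]
      rcases hfa with hfam1 | ⟨hfa0, hfan, hfaseen⟩
      · -- root call: parent slot is -1, A's close step is a no-op
        have hclose : pvClose e2M p2 i = e2M := by
          unfold pvClose
          rw [hp2i, hfam1]
          simp
        rw [hclose] at hML
        refine ⟨o2, s2, e2M, PySem.List.pySetD e2N i (o2 - 1), p2, hML, hNL, hto2,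
          hls2, hlm2, by rw [pvLenSet e2N i _ hi0, hln2], hlp2, ?_, ?_, ?_, ?_, hP1⟩
        · intro t ht hts htv
          have hti := htne_of t hts
          rw [E1k t ht (hcons_of t hts) hti, pvGetSetNe eM i t order 0 hi0 ht hti]
        · intro t ht hts
          have hti := htne_of t hts
          rw [pvGetSetNe e2N i t (o2 - 1) 0 hi0 ht hti, E2k t ht (hcons_of t hts)]
        · intro t ht hts
          by_cases hti : t = i
          · subst hti
            rw [hbk, pvGetSetSelf e2N t (o2 - 1) 0 hi0 (by rw [hln2]; exact hin)]
          · have hts' : t ∉ (i :: seen) := by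
              intro hh
              rcases List.mem_cons.mp hh with h | h
              · exact hti h
              · exact hts h
            rw [pvGetSetNe e2N i t (o2 - 1) 0 hi0 ht hti]
            exact E3k t ht hts'
        · intro h; exact absurd hfam1 h
      · -- non-root: A's close step writes end[fa] = o2 - 1, which B's caller also holds
        have hfane : (fa : Int) ≠ -1 := by omega
        have hclose : pvClose e2M p2 i = PySem.List.pySetD e2M fa (o2 - 1) := by
          unfold pvClose
          rw [hp2i, if_pos hfane, hbk]
        rw [hclose] at hML
        have hfai : fa ≠ i := fun hh => hiseen (hh ▸ hfaseen)
        refine ⟨o2, s2, PySem.List.pySetD e2M fa (o2 - 1),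
          PySem.List.pySetD e2N i (o2 - 1), p2, hML, hNL, hto2,
          hls2, by rw [pvLenSet e2M fa _ hfa0, hlm2],
          by rw [pvLenSet e2N i _ hi0, hln2], hlp2, ?_, ?_, ?_, ?_, hP1⟩
        · intro t ht hts htv
          have hti := htne_of t hts
          rw [pvGetSetNe e2M fa t (o2 - 1) 0 hfa0 ht htv,
            E1k t ht (hcons_of t hts) hti, pvGetSetNe eM i t order 0 hi0 ht hti]
        · intro t ht hts
          have hti := htne_of t hts
          rw [pvGetSetNe e2N i t (o2 - 1) 0 hi0 ht hti, E2k t ht (hcons_of t hts)]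
        · intro t ht hts
          have htfa : t ≠ fa := fun hh => hts (hh ▸ hfaseen)
          rw [pvGetSetNe e2M fa t (o2 - 1) 0 hfa0 ht htfa]
          by_cases hti : t = i
          · subst hti
            rw [hbk, pvGetSetSelf e2N t (o2 - 1) 0 hi0 (by rw [hln2]; exact hin)]
          · have hts' : t ∉ (i :: seen) := by
              intro hh
              rcases List.mem_cons.mp hh with h | h
              · exact hti h
              · exact hts h
            rw [pvGetSetNe e2N i t (o2 - 1) 0 hi0 ht hti]
            exact E3k t ht hts'
        · intro _
          rw [pvGetSetSelf e2M fa (o2 - 1) 0 hfa0 (by rw [hlm2]; exact hfan)]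

-- ===== VERDICT (by name: the statement is the Claim_ definition above) =====
theorem gen_bfs_order_iteration_spec : Claim_equal_gen_bfs_order_iteration := by
  intro dct _ hpre
  unfold Spec_gen_bfs_order_iteration
  unfold Pre_gen_bfs_order_iteration at hpre
  obtain ⟨seen', hscan⟩ := Option.isSome_iff_exists.mp hpre
  obtain ⟨_, h0n, _⟩ := pvReachTree_facts _ _ _ _ _ _ hscan
  have hn1 : 0 < dct.length := by
    have : (0 : Int) < ((dct.map (fun l => PySem.List.sorted l (fun x => x) true)).length : Int) := by omega
    simpa using this
  obtain ⟨hnd, hmem⟩ := pvReachTree_inv _ _ _ _ _ _ hscan List.nodup_nil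
  have hbound : seen'.length ≤ dct.length := by
    have := pvLenBound dct.length seen' hnd (fun t ht => by
      have := (hmem t ht).resolve_left (fun hh => absurd hh List.not_mem_nil)
      simpa using this)
    exact this
  have hfuel : 2 * (seen'.length - ([] : List Int).length) ≤ pvFuel dct := by
    have hmul : (dct.length + 1) ≤ (dct.length + 1) * ((dct.map List.length).sum + 1) :=
      Nat.le_mul_of_pos_right _ (Nat.succ_pos _)
    have hassoc : 2 * (dct.length + 1) * ((dct.map List.length).sum + 1)
        = 2 * ((dct.length + 1) * ((dct.map List.length).sum + 1)) := by ring
    unfold pvFuel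
    simp only [List.length_nil]
    omega
  have hp0 : PySem.List.pyGetD (List.replicate dct.length (-1 : Int)) 0 (-1) = -1 := by
    have hh := PySem.List.pyGetD_natCast (List.replicate dct.length (-1 : Int)) 0 (-1)
    simpa [List.getD_eq_getElem?_getD, List.getElem?_replicate, hn1] using hh
  obtain ⟨o2, s2, e2M, e2N, p2, hM, hN, _, _, hlm2, hln2, _, _, _, E3, _, _⟩ :=
    mainSim (dct.map (fun l => PySem.List.sorted l (fun x => x) true))
      (pvFuel dct) (pvFuel dct) 0 (-1) 0
      (List.replicate dct.length (-1)) (List.replicate dct.length (-1))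
      (List.replicate dct.length (-1)) (List.replicate dct.length (-1)) [] seen'
      hscan hfuel hp0 (Or.inl rfl) (fun t _ _ => rfl)
      (by simp) (by simp) (by simp) (by simp)
  have heq : e2M = e2N := by
    apply List.ext_getElem (by rw [hlm2, hln2])
    intro k h1 h2
    have h3 := E3 (k : Int) (Int.natCast_nonneg k) List.not_mem_nil
    rw [pvGetNN _ _ _ (Int.natCast_nonneg k), pvGetNN _ _ _ (Int.natCast_nonneg k),
      List.getD_eq_getElem?_getD, List.getD_eq_getElem?_getD] at h3
    simp only [Int.toNat_natCast] at h3
    rw [List.getElem?_eq_getElem h1, List.getElem?_eq_getElem h2] at h3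
    simpa using h3
  have hA : gen_bfs_order_iteration dct = (s2, e2M) := by
    show loopA (dct.map (fun l => PySem.List.sorted l (fun x => x) true)) (pvFuel dct)
        [(0, -1, 0)] 0 (List.replicate dct.length (-1)) (List.replicate dct.length (-1))
        (List.replicate dct.length (-1)) (List.replicate dct.length (-1))
        (List.replicate dct.length (-1)) = (s2, e2M)
    rw [loopA_eq_red,
      sim (dct.map (fun l => PySem.List.sorted l (fun x => x) true))
        (pvFuel dct) (pvFuel dct) 0 (-1) 0 [] 0 _ _ _ le_rfl (by norm_num), hM]
    simp [loopAred_nil]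
  have hB : gen_bfs_order_iteration_alt dct = (s2, e2N) := by
    show (match dfsN (dct.map (fun l => PySem.List.sorted l (fun x => x) true)) (pvFuel dct)
        0 (-1) 0 (List.replicate dct.length (-1)) (List.replicate dct.length (-1)) with
      | some (_, s, e) => (s, e)
      | none => (List.replicate dct.length (-1), List.replicate dct.length (-1))) = (s2, e2N)
    rw [hN]
  rw [hA, hB, heq]
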